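-- pv_equiv track=rewrite | github.com/YotamMeg/ImageEditor | cartoonify.py | create_patch
-- ===== SOURCE A (Python) =====
-- def create_patch(image, location, kernel): # location = [row,col]
--     """
--     creates a patch from the image with n rows and columns, with n being the length of the kernel.
--     adds the looked at pixel to the patch where the index of the patch falls out of the image
--     :param image: an image
--     :param location: a list of with two elements, the first being the rows index of the image and the second
--     being the columns index
--     :param kernel: a kernel
--     :return: a patch from the image, in its center is the pixel matching the given location
--     """
--     patch = []
--     for i in range(location[0] - len(kernel)//2, location[0] + len(kernel)//2 + 1):
--         patch_row = []
--         for j in range(location[1] - len(kernel)//2, location[1] + len(kernel)//2 + 1):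
--             if len(image) > i >= 0 and len(image[i]) > j >= 0:
--                 # if the current cell of the patch is inside the image
--                 patch_row.append(image[i][j])
--             else:
--                 # else we add to the patch the pixel matching the given location
--                 patch_row.append(image[location[0]][location[1]])
--         patch.append(patch_row)
--     return patch
-- ===== SOURCE B (Python) =====
-- def create_patch(image, location, kernel):
--     h = len(kernel) // 2
--     n = 2 * h + 1
--     r0 = location[0] - h
--     c0 = location[1] - h
--     center = image[location[0]][location[1]]
--     patch = []
--     for i in range(r0, r0 + n):
--         if 0 <= i < len(image):
--             row = image[i]
--             lo = max(c0, 0)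
--             hi = min(c0 + n, len(row))
--             if lo >= hi:
--                 patch.append([center] * n)
--             else:
--                 patch.append([center] * (lo - c0) + row[lo:hi] + [center] * (c0 + n - hi))
--         else:
--             patch.append([center] * n)
--     return patch
-- ===== Notes on version B (the rewrite author's own statement) =====
-- stated objective: alternative
-- what changed: Per-cell bounds test inside a double loop is replaced by per-row block construction: each patch row is a center-pixel pad, a slice of the image row, and another pad, with out-of-range rows emitted wholesale as replicated center pixels.
import Mathlib
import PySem

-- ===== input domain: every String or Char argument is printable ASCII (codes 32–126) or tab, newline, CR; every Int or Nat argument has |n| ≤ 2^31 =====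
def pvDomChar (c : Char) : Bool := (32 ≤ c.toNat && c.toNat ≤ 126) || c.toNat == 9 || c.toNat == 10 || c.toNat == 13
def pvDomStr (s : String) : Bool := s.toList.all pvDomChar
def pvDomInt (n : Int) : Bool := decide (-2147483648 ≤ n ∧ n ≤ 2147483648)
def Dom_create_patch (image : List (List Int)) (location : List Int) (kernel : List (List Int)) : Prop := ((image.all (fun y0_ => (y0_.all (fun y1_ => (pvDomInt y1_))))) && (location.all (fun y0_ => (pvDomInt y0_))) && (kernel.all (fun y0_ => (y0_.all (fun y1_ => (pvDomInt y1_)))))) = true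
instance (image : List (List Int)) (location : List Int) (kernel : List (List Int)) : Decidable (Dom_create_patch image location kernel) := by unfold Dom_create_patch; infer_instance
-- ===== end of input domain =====

-- B builds each patch row as pad ++ row-slice ++ pad (whole-row replicate when out of range)
-- instead of A's per-cell bounds test; same asymptotic cost, alternative decomposition.

-- ===== PORT A =====
def create_patch (image : List (List Int)) (location : List Int) (kernel : List (List Int)) : List (List Int) :=
  let l0 : Int := PySem.List.pyGetD location 0 0
  let l1 : Int := PySem.List.pyGetD location 1 0
  let h : Int := PySem.Int.floordiv (kernel.length : Int) 2
  (PySem.List.pyRange (l0 - h) (l0 + h + 1) 1).map (fun i =>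
    (PySem.List.pyRange (l1 - h) (l1 + h + 1) 1).map (fun j =>
      if (i < (image.length : Int) ∧ 0 ≤ i) ∧
         (j < ((PySem.List.pyGetD image i []).length : Int) ∧ 0 ≤ j) then
        PySem.List.pyGetD (PySem.List.pyGetD image i []) j 0
      else
        PySem.List.pyGetD (PySem.List.pyGetD image l0 []) l1 0))

-- ===== PORT B =====
def create_patch_alt (image : List (List Int)) (location : List Int) (kernel : List (List Int)) : List (List Int) :=
  let h : Nat := kernel.length / 2
  let n : Nat := 2 * h + 1
  let r0 : Int := PySem.List.pyGetD location 0 0 - h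
  let c0 : Int := PySem.List.pyGetD location 1 0 - h
  let center : Int :=
    PySem.List.pyGetD (PySem.List.pyGetD image (PySem.List.pyGetD location 0 0) [])
      (PySem.List.pyGetD location 1 0) 0
  (PySem.List.pyRange r0 (r0 + n) 1).map (fun i =>
    if 0 ≤ i ∧ i < (image.length : Int) then
      let row := PySem.List.pyGetD image i []
      let lo : Int := max c0 0
      let hi : Int := min (c0 + n) (row.length : Int)
      if lo ≥ hi then List.replicate n center
      else List.replicate (lo - c0).toNat center
           ++ PySem.List.slice row (some lo) (some hi)
           ++ List.replicate (c0 + n - hi).toNat center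
    else List.replicate n center)

-- ===== PRECONDITION & SPEC =====
-- Pre_: location has at least two entries and the center pixel image[location[0]][location[1]]
-- exists under Python indexing (negative wrap included); outside this A raises IndexError
-- (the center cell of the patch always hits the fallback lookup when it is out of bounds).
def Pre_create_patch (image : List (List Int)) (location : List Int) (kernel : List (List Int)) : Prop :=
  2 ≤ location.length ∧
  (((PySem.List.pyGet? image (PySem.List.pyGetD location 0 0)).bind
      (fun r => PySem.List.pyGet? r (PySem.List.pyGetD location 1 0))).isSome = true)
instance (image : List (List Int)) (location : List Int) (kernel : List (List Int)) : Decidable (Pre_create_patch image location kernel) := by unfold Pre_create_patch; infer_instance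
def pvWitness_create_patch : List (List Int) × List Int × List (List Int) :=
  ([[1, 2], [3, 4]], [0, 1], [[0]])
def Spec_create_patch (image : List (List Int)) (location : List Int) (kernel : List (List Int)) (out : List (List Int)) : Prop := out = create_patch_alt image location kernel
instance (image : List (List Int)) (location : List Int) (kernel : List (List Int)) (out : List (List Int)) : Decidable (Spec_create_patch image location kernel out) := by unfold Spec_create_patch; infer_instance

-- ===== CLAIM (what is proved, stated in full; the proofs are below) =====
def Claim_equal_create_patch : Prop := ∀ (image : List (List Int)) (location : List Int) (kernel : List (List Int)), Dom_create_patch image location kernel → Pre_create_patch image location kernel → Spec_create_patch image location kernel (create_patch image location kernel)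

-- ===== LEMMAS AND PROOFS =====

theorem sliceMap (row : List Int) (a b : Int) (h0 : 0 ≤ a) (hb : b ≤ row.length) :
    (PySem.List.pyRange a b 1).map (fun j => PySem.List.pyGetD row j 0)
      = (row.drop a.toNat).take (b.toNat - a.toNat) := by
  apply List.ext_getElem
  · simp [PySem.List.length_pyRange_one]; omega
  · intro k h1 h2
    simp only [List.length_map, PySem.List.length_pyRange_one] at h1
    simp only [List.getElem_map, PySem.List.getElem_pyRange_one, List.getElem_take, List.getElem_drop]
    rw [PySem.List.pyGetD_eq_getElem row 0 (by omega) (by omega)]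
    congr 1
    omega

theorem rowEq (row : List Int) (c0 : Int) (n : Nat) (center : Int) :
    (PySem.List.pyRange c0 (c0 + n) 1).map
        (fun j => if j < (row.length : Int) ∧ 0 ≤ j then PySem.List.pyGetD row j 0 else center)
    = (if max c0 0 ≥ min (c0 + n) (row.length : Int) then List.replicate n center
       else List.replicate (max c0 0 - c0).toNat center
            ++ PySem.List.slice row (some (max c0 0)) (some (min (c0 + n) (row.length : Int)))
            ++ List.replicate (c0 + n - min (c0 + n) (row.length : Int)).toNat center) := by
  split_ifs with hge
  · rw [List.map_congr_left (g := fun _ => center) (by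
      intro j hj
      rw [PySem.List.mem_pyRange_one] at hj
      rw [if_neg (by omega)])]
    rw [List.map_const', PySem.List.length_pyRange_one]
    congr 1
    omega
  · rw [not_le] at hge
    have h1 : (PySem.List.pyRange c0 (max c0 0) 1).map
        (fun j => if j < (row.length : Int) ∧ 0 ≤ j then PySem.List.pyGetD row j 0 else center)
        = List.replicate (max c0 0 - c0).toNat center := by
      rw [List.map_congr_left (g := fun _ => center) (by
        intro j hj
        rw [PySem.List.mem_pyRange_one] at hj
        rw [if_neg (by omega)])]
      rw [List.map_const', PySem.List.length_pyRange_one]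
    have h2 : (PySem.List.pyRange (max c0 0) (min (c0 + n) (row.length : Int)) 1).map
        (fun j => if j < (row.length : Int) ∧ 0 ≤ j then PySem.List.pyGetD row j 0 else center)
        = PySem.List.slice row (some (max c0 0)) (some (min (c0 + n) (row.length : Int))) := by
      rw [List.map_congr_left (g := fun j => PySem.List.pyGetD row j 0) (by
        intro j hj
        rw [PySem.List.mem_pyRange_one] at hj
        rw [if_pos (by omega)])]
      rw [sliceMap row _ _ (by omega) (by omega),
          PySem.List.slice_toNat row (by omega) (by omega)]
    have h3 : (PySem.List.pyRange (min (c0 + n) (row.length : Int)) (c0 + n) 1).map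
        (fun j => if j < (row.length : Int) ∧ 0 ≤ j then PySem.List.pyGetD row j 0 else center)
        = List.replicate (c0 + n - min (c0 + n) (row.length : Int)).toNat center := by
      rw [List.map_congr_left (g := fun _ => center) (by
        intro j hj
        rw [PySem.List.mem_pyRange_one] at hj
        rw [if_neg (by omega)])]
      rw [List.map_const', PySem.List.length_pyRange_one]
    rw [PySem.List.pyRange_one_append c0 (max c0 0) (c0 + n) (by omega) (by omega),
        PySem.List.pyRange_one_append (max c0 0) (min (c0 + n) (row.length : Int)) (c0 + n)
          (by omega) (by omega),
        List.map_append, List.map_append, h1, h2, h3, List.append_assoc]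

-- ===== VERDICT (by name: the statement is the Claim_ definition above) =====
theorem create_patch_spec : Claim_equal_create_patch := by
  intro image location kernel _ _
  unfold Spec_create_patch
  simp only [create_patch, create_patch_alt]
  have hdiv : PySem.Int.floordiv (kernel.length : Int) 2 = ((kernel.length / 2 : Nat) : Int) := by
    exact_mod_cast PySem.Int.floordiv_natCast kernel.length 2
  rw [hdiv]
  set l0 : Int := PySem.List.pyGetD location 0 0 with hl0
  set l1 : Int := PySem.List.pyGetD location 1 0 with hl1
  set h : Nat := kernel.length / 2 with hh
  set n : Nat := 2 * h + 1 with hn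
  have hout : l0 + (h : Int) + 1 = (l0 - h) + (n : Int) := by omega
  have hinn : l1 + (h : Int) + 1 = (l1 - h) + (n : Int) := by omega
  rw [hout]
  apply List.map_congr_left
  intro i hi
  by_cases hib : 0 ≤ i ∧ i < (image.length : Int)
  · rw [if_pos hib]
    have hcut : ∀ (Q : Prop),
        ((i < (image.length : Int) ∧ 0 ≤ i) ∧ Q) = Q := fun Q => by
      rw [eq_iff_iff]; exact and_iff_right ⟨hib.2, hib.1⟩
    simp only [hcut]
    rw [hinn]
    exact rowEq (PySem.List.pyGetD image i []) (l1 - h) n _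
  · rw [if_neg hib]
    rw [List.map_congr_left (g := fun _ =>
        PySem.List.pyGetD (PySem.List.pyGetD image l0 []) l1 0) (by
      intro j hj
      rw [if_neg (by tauto)])]
    rw [List.map_const', PySem.List.length_pyRange_one]
    congr 1
    omega
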